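-- pv_equiv track=rewrite | github.com/arnozhang/Datus-agent | datus/storage/reference_template/template_file_processor.py | _update_jinja_state
-- ===== SOURCE A (Python) =====
-- from typing import Any, Dict, List, Optional, Tuple
--
-- def _update_jinja_state(line: str, in_jinja_block: int, in_jinja_comment: bool) -> Tuple[int, bool]:
--     """Update Jinja2 block/comment state after processing a line.
--
--     Args:
--         line: The line to scan
--         in_jinja_block: Current block nesting depth
--         in_jinja_comment: Whether inside a Jinja2 comment
--
--     Returns:
--         Tuple of (updated_block_depth, updated_in_comment)
--     """
--     i = 0
--     while i < len(line):
--         if in_jinja_comment: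
--             end_pos = line.find("#}", i)
--             if end_pos >= 0:
--                 in_jinja_comment = False
--                 i = end_pos + 2
--             else:
--                 return in_jinja_block, True
--         elif line[i : i + 2] == "{#":
--             in_jinja_comment = True
--             i += 2
--         elif line[i : i + 2] == "{%":
--             # Check for block-opening tags (for, if, block, macro, etc.)
--             end_pos = line.find("%}", i)
--             if end_pos >= 0:
--                 tag_content = line[i + 2 : end_pos].strip()
--                 if _is_block_opening_tag(tag_content):
--                     in_jinja_block += 1
--                 elif _is_block_closing_tag(tag_content):
--                     in_jinja_block = max(0, in_jinja_block - 1)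
--                 i = end_pos + 2
--             else:
--                 i += 2
--         else:
--             i += 1
--
--     return in_jinja_block, in_jinja_comment
--
-- def _is_block_opening_tag(tag_content: str) -> bool:
--     """Check if a Jinja2 tag opens a block."""
--     opening_keywords = {"for", "if", "block", "macro", "call", "filter", "set"}
--     first_word = tag_content.split()[0] if tag_content.split() else ""
--     # 'set' only opens a block if it doesn't have '=' (assignment form)
--     if first_word == "set" and "=" in tag_content:
--         return False
--     return first_word in opening_keywords
--
-- def _is_block_closing_tag(tag_content: str) -> bool:
--     """Check if a Jinja2 tag closes a block."""
--     closing_keywords = {"endfor", "endif", "endblock", "endmacro", "endcall", "endfilter", "endset"}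
--     first_word = tag_content.split()[0] if tag_content.split() else ""
--     return first_word in closing_keywords
-- ===== SOURCE B (Python) =====
-- from typing import Tuple
--
-- _OPENING = {"for", "if", "block", "macro", "call", "filter", "set"}
-- _CLOSING = {"endfor", "endif", "endblock", "endmacro", "endcall", "endfilter", "endset"}
--
--
-- def _tag_delta(tag_content: str) -> int:
--     """+1 if the tag opens a block, -1 if it closes one, 0 otherwise."""
--     words = tag_content.split()
--     first = words[0] if words else ""
--     if first in _OPENING and not (first == "set" and "=" in tag_content):
--         return 1
--     if first in _CLOSING:
--         return -1
--     return 0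
--
--
-- def _update_jinja_state(line: str, in_jinja_block: int, in_jinja_comment: bool) -> Tuple[int, bool]:
--     """Jump from marker to marker on ever-shorter suffixes of the line."""
--     s = line
--     block, comment = in_jinja_block, in_jinja_comment
--     while True:
--         if comment:
--             _, sep, rest = s.partition("#}")
--             if not sep:
--                 return block, True
--             comment = False
--             s = rest
--         else:
--             p = s.find("{#")
--             q = s.find("{%")
--             if p < 0 and q < 0:
--                 return block, False
--             if q < 0 or (0 <= p < q):
--                 comment = True
--                 s = s[p + 2:]
--             else:
--                 t = s[q + 1:]          # keep the '%' so an overlapping "%}" is seen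
--                 e = t.find("%}")
--                 if e < 0:
--                     s = s[q + 2:]
--                 else:
--                     d = _tag_delta(t[1:e].strip())
--                     if d > 0:
--                         block += 1
--                     elif d < 0:
--                         block = max(0, block - 1)
--                     s = t[e + 2:]
-- ===== Notes on version B (the rewrite author's own statement) =====
-- stated objective: alternative
-- what changed: A walks the line character by character with an index cursor; B repeatedly jumps straight to the next relevant marker (earliest of '{#'/'{%', or '#}' in comment state) on ever-shorter suffixes via find/slicing, and replaces the opening/closing if-elif pair by a signed tag-delta helper.
import Mathlib
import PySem

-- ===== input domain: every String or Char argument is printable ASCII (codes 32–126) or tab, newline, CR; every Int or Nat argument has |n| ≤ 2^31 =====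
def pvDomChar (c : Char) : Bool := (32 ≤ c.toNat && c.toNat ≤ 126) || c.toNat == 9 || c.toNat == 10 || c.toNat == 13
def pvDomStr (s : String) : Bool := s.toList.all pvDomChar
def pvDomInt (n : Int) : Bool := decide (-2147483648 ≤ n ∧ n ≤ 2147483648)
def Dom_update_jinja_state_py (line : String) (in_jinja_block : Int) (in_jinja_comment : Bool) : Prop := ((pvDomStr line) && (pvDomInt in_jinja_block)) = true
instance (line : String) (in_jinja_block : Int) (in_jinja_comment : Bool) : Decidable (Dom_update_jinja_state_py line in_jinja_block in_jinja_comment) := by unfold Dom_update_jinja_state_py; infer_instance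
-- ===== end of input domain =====

-- B replaces A's char-by-char index loop by a marker-to-marker jump machine on suffixes
-- (find the next "{#"/"{%"/"#}" directly and a signed tag delta); equivalence of the
-- RETURN value is proved on all inputs (neither version mutates anything).

-- ===== PORT A =====
-- keyword sets of Source A (as lists of char lists; shared literals of both Pythons)
def pvOpenKW : List (List Char) :=
  [['f','o','r'], ['i','f'], ['b','l','o','c','k'], ['m','a','c','r','o'],
   ['c','a','l','l'], ['f','i','l','t','e','r'], ['s','e','t']]
def pvCloseKW : List (List Char) :=
  [['e','n','d','f','o','r'], ['e','n','d','i','f'], ['e','n','d','b','l','o','c','k'],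
   ['e','n','d','m','a','c','r','o'], ['e','n','d','c','a','l','l'],
   ['e','n','d','f','i','l','t','e','r'], ['e','n','d','s','e','t']]

-- tag_content.split()[0] if tag_content.split() else ""
def pvFirstWord (tag : List Char) : List Char :=
  match PySem.Chars.split₀ tag with
  | [] => []
  | w :: _ => w

-- _is_block_opening_tag
def pvIsOpening (tag : List Char) : Bool :=
  let first := pvFirstWord tag
  if first == ['s','e','t'] && PySem.Chars.isIn ['='] tag then false
  else pvOpenKW.contains first

-- _is_block_closing_tag
def pvIsClosing (tag : List Char) : Bool :=
  pvCloseKW.contains (pvFirstWord tag)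

-- the while-loop of A, index i over the characters of the line
def pvALoop (cs : List Char) (i : Nat) (block : Int) (comment : Bool) : Int × Bool :=
  if hi : i < cs.length then
    if comment then
      let e := PySem.Chars.findFrom cs ['#', '}'] (i : Int)
      if he : 0 ≤ e then pvALoop cs (e.toNat + 2) block false
      else (block, true)
    else if PySem.Chars.slice cs (some (i : Int)) (some ((i : Int) + 2)) = ['{', '#'] then
      pvALoop cs (i + 2) block true
    else if PySem.Chars.slice cs (some (i : Int)) (some ((i : Int) + 2)) = ['{', '%'] then
      let e := PySem.Chars.findFrom cs ['%', '}'] (i : Int)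
      if he : 0 ≤ e then
        let tag := PySem.Chars.strip (PySem.Chars.slice cs (some ((i : Int) + 2)) (some e))
        let block' := if pvIsOpening tag then block + 1
                      else if pvIsClosing tag then max 0 (block - 1)
                      else block
        pvALoop cs (e.toNat + 2) block' comment
      else pvALoop cs (i + 2) block comment
    else pvALoop cs (i + 1) block comment
  else (block, comment)
  termination_by cs.length - i
  decreasing_by
  · have hev : e = PySem.Chars.findFrom cs ['#', '}'] (i : Int) := rfl
    rw [hev] at he
    have h := (PySem.Chars.findFrom_natCast_spec cs ['#', '}'] i (le_of_lt hi)
      (by intro h0; rw [h0] at he; omega)).1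
    omega
  · omega
  · have hev : e = PySem.Chars.findFrom cs ['%', '}'] (i : Int) := rfl
    rw [hev] at he
    have h := (PySem.Chars.findFrom_natCast_spec cs ['%', '}'] i (le_of_lt hi)
      (by intro h0; rw [h0] at he; omega)).1
    omega
  · omega
  · omega

def update_jinja_state_py (line : String) (in_jinja_block : Int) (in_jinja_comment : Bool) : Int × Bool :=
  pvALoop line.toList 0 in_jinja_block in_jinja_comment

-- ===== PORT B =====
-- _tag_delta of Source B
def pvTagDelta (tag : List Char) : Int :=
  let first := pvFirstWord tag
  if pvOpenKW.contains first && !(first == ['s','e','t'] && PySem.Chars.isIn ['='] tag) then 1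
  else if pvCloseKW.contains first then -1
  else 0

-- the while-loop of Source B: s is always a suffix of the line
def pvBLoop (s : List Char) (block : Int) (comment : Bool) : Int × Bool :=
  if comment then
    let e := PySem.Chars.find s ['#', '}']
    if he : 0 ≤ e then pvBLoop (s.drop (e.toNat + 2)) block false
    else (block, true)
  else
    let p := PySem.Chars.find s ['{', '#']
    let q := PySem.Chars.find s ['{', '%']
    if p < 0 ∧ q < 0 then (block, false)
    else if q < 0 ∨ (0 ≤ p ∧ p < q) then
      pvBLoop (s.drop (p.toNat + 2)) block true
    else
      let t := s.drop (q.toNat + 1)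
      let e := PySem.Chars.find t ['%', '}']
      if he : 0 ≤ e then
        let d := pvTagDelta (PySem.Chars.strip (PySem.List.slice t (some 1) (some e)))
        let block' := if 0 < d then block + 1
                      else if d < 0 then max 0 (block - 1)
                      else block
        pvBLoop (t.drop (e.toNat + 2)) block' comment
      else pvBLoop (s.drop (q.toNat + 2)) block comment
  termination_by s.length
  decreasing_by
  · have hev : e = PySem.Chars.find s ['#', '}'] := rfl
    rw [hev] at he
    have h : (['#', '}'] : List Char) <:+: s := (PySem.Chars.find_nonneg_iff s _).1 he
    have hl := h.length_le
    simp only [List.length_drop]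
    simp only [List.length_cons, List.length_nil] at hl
    omega
  · rename_i hc hnot hpq
    have hpv : p = PySem.Chars.find s ['{', '#'] := rfl
    have hqv : q = PySem.Chars.find s ['{', '%'] := rfl
    rw [hpv, hqv] at hnot hpq
    have hp : 0 ≤ PySem.Chars.find s ['{', '#'] := by
      rcases hpq with h | h
      · by_contra hcon; exact hnot ⟨by omega, h⟩
      · exact h.1
    have h : (['{', '#'] : List Char) <:+: s := (PySem.Chars.find_nonneg_iff s _).1 hp
    have hl := h.length_le
    simp only [List.length_drop]
    simp only [List.length_cons, List.length_nil] at hl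
    omega
  · rename_i hc hnot hpq
    have hqv : q = PySem.Chars.find s ['{', '%'] := rfl
    rw [hqv] at hpq
    have hq : 0 ≤ PySem.Chars.find s ['{', '%'] := by
      by_contra hcon; exact hpq (Or.inl (by omega))
    have h : (['{', '%'] : List Char) <:+: s := (PySem.Chars.find_nonneg_iff s _).1 hq
    have hl := h.length_le
    simp only [List.length_drop]
    simp only [List.length_cons, List.length_nil] at hl
    omega
  · rename_i hc hnot hpq
    have hqv : q = PySem.Chars.find s ['{', '%'] := rfl
    rw [hqv] at hpq
    have hq : 0 ≤ PySem.Chars.find s ['{', '%'] := by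
      by_contra hcon; exact hpq (Or.inl (by omega))
    have h : (['{', '%'] : List Char) <:+: s := (PySem.Chars.find_nonneg_iff s _).1 hq
    have hl := h.length_le
    simp only [List.length_drop]
    simp only [List.length_cons, List.length_nil] at hl
    omega

def update_jinja_state_py_alt (line : String) (in_jinja_block : Int) (in_jinja_comment : Bool) : Int × Bool :=
  pvBLoop line.toList in_jinja_block in_jinja_comment

-- ===== PRECONDITION & SPEC =====
def Spec_update_jinja_state_py (line : String) (in_jinja_block : Int) (in_jinja_comment : Bool) (out : Int × Bool) : Prop := out = update_jinja_state_py_alt line in_jinja_block in_jinja_comment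
instance (line : String) (in_jinja_block : Int) (in_jinja_comment : Bool) (out : Int × Bool) : Decidable (Spec_update_jinja_state_py line in_jinja_block in_jinja_comment out) := by unfold Spec_update_jinja_state_py; infer_instance

-- ===== CLAIM (what is proved, stated in full; the proofs are below) =====
def Claim_equal_update_jinja_state_py : Prop := ∀ (line : String) (in_jinja_block : Int) (in_jinja_comment : Bool), Dom_update_jinja_state_py line in_jinja_block in_jinja_comment → Spec_update_jinja_state_py line in_jinja_block in_jinja_comment (update_jinja_state_py line in_jinja_block in_jinja_comment)

-- ===== LEMMAS AND PROOFS =====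

lemma pvBLoop_nil (block : Int) (comment : Bool) : pvBLoop [] block comment = (block, comment) := by
  unfold pvBLoop
  have h1 : PySem.Chars.find [] ['#','}'] = -1 := by
    rw [PySem.Chars.find_eq_neg_one_iff]; simp
  have h2 : PySem.Chars.find [] ['{','#'] = -1 := by
    rw [PySem.Chars.find_eq_neg_one_iff]; simp
  have h3 : PySem.Chars.find [] ['{','%'] = -1 := by
    rw [PySem.Chars.find_eq_neg_one_iff]; simp
  cases comment <;> simp [h1, h2, h3]

lemma pvALoop_ge (cs : List Char) (i : Nat) (block : Int) (comment : Bool)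
    (h : ¬ i < cs.length) : pvALoop cs i block comment = (block, comment) := by
  unfold pvALoop
  simp [h]

-- A's opening test equals the boolean combination B uses
lemma pvIsOpening_eq (tag : List Char) :
    pvIsOpening tag =
      (pvOpenKW.contains (pvFirstWord tag)
        && !(pvFirstWord tag == ['s','e','t'] && PySem.Chars.isIn ['='] tag)) := by
  unfold pvIsOpening
  cases h : (pvFirstWord tag == ['s','e','t'] && PySem.Chars.isIn ['='] tag) <;> simp [h]

-- the per-tag block update of the two programs agree
lemma pvTagUpdate_eq (tag : List Char) (block : Int) :
    (if pvIsOpening tag then block + 1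
     else if pvIsClosing tag then max 0 (block - 1) else block)
    = (if 0 < pvTagDelta tag then block + 1
       else if pvTagDelta tag < 0 then max 0 (block - 1) else block) := by
  unfold pvTagDelta pvIsClosing
  rw [pvIsOpening_eq]
  cases ho : (pvOpenKW.contains (pvFirstWord tag)
      && !(pvFirstWord tag == ['s','e','t'] && PySem.Chars.isIn ['='] tag)) <;>
    cases hc : pvCloseKW.contains (pvFirstWord tag) <;>
      simp only [ho, hc] <;> norm_num


lemma pvFindOfPrefix (s sub : List Char) (h : sub <+: s) : PySem.Chars.find s sub = 0 := by
  have hn : 0 ≤ PySem.Chars.find s sub := (PySem.Chars.find_nonneg_iff s sub).2 h.isInfix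
  have spec := PySem.Chars.find_spec hn
  by_contra hne
  have hpos : 0 < (PySem.Chars.find s sub).toNat := by omega
  exact (spec.2 0 hpos) (by simpa using h)

lemma pvFindDropOne (s sub : List Char) (h0 : ¬ sub <+: s) :
    PySem.Chars.find s sub =
      if PySem.Chars.find (s.drop 1) sub = -1 then -1
      else 1 + PySem.Chars.find (s.drop 1) sub := by
  by_cases hd : PySem.Chars.find (s.drop 1) sub = -1
  · rw [if_pos hd]
    rw [PySem.Chars.find_eq_neg_one_iff] at hd ⊢
    intro hin
    apply hd
    have hex : ∃ j, sub <+: s.drop j := by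
      rw [PySem.Chars.exists_prefix_drop_iff_isIn, PySem.Chars.isIn_iff_infix]; exact hin
    obtain ⟨j, hj⟩ := hex
    rcases Nat.eq_zero_or_pos j with hj0 | hjpos
    · exact absurd (by simpa [hj0] using hj) h0
    · have : sub <+: (s.drop 1).drop (j - 1) := by
        rw [List.drop_drop]
        have : 1 + (j - 1) = j := by omega
        rw [this]; exact hj
      rw [← PySem.Chars.isIn_iff_infix, ← PySem.Chars.exists_prefix_drop_iff_isIn]
      exact ⟨j - 1, this⟩
  · rw [if_neg hd]
    have hm : 0 ≤ PySem.Chars.find (s.drop 1) sub := by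
      have := PySem.Chars.neg_one_le_find (s.drop 1) sub; omega
    have specm := PySem.Chars.find_spec hm
    have hn : 0 ≤ PySem.Chars.find s sub := by
      rw [PySem.Chars.find_nonneg_iff, ← PySem.Chars.isIn_iff_infix,
        ← PySem.Chars.exists_prefix_drop_iff_isIn]
      refine ⟨1 + (PySem.Chars.find (s.drop 1) sub).toNat, ?_⟩
      rw [← List.drop_drop]
      exact specm.1
    have specn := PySem.Chars.find_spec hn
    set m := PySem.Chars.find (s.drop 1) sub with hmv
    set n := PySem.Chars.find s sub with hnv
    have hn0 : n.toNat ≠ 0 := by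
      intro h; apply h0; have := specn.1; rw [h] at this; simpa using this
    have hub : n.toNat ≤ 1 + m.toNat := by
      by_contra hc
      exact (specn.2 (1 + m.toNat) (by omega)) (by rw [← List.drop_drop]; exact specm.1)
    have hlb : m.toNat ≤ n.toNat - 1 := by
      by_contra hc
      apply (specm.2 (n.toNat - 1) (by omega))
      rw [List.drop_drop]
      have : 1 + (n.toNat - 1) = n.toNat := by omega
      rw [this]; exact specn.1
    omega

lemma pvBLoop_shift (s : List Char) (block : Int)
    (h1 : ¬ (['{','#'] : List Char) <+: s) (h2 : ¬ (['{','%'] : List Char) <+: s) :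
    pvBLoop s block false = pvBLoop (s.drop 1) block false := by
  have hp := pvFindDropOne s ['{','#'] h1
  have hq := pvFindDropOne s ['{','%'] h2
  have hp' := PySem.Chars.neg_one_le_find (s.drop 1) ['{','#']
  have hq' := PySem.Chars.neg_one_le_find (s.drop 1) ['{','%']
  rw [pvBLoop, pvBLoop]
  simp only [Bool.false_eq_true, if_false]
  by_cases hd1 : PySem.Chars.find (s.drop 1) ['{','#'] = -1 <;>
    by_cases hd2 : PySem.Chars.find (s.drop 1) ['{','%'] = -1
  · simp only [hd1, hd2, reduceIte] at hp hq
    rw [hp, hq, hd1, hd2]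
    norm_num
  · -- p' = -1, q' ≥ 0 : both take the {%-branch with the same t
    simp only [hd1, hd2, reduceIte] at hp hq
    have hq0 : 0 ≤ PySem.Chars.find (s.drop 1) ['{','%'] := by omega
    rw [hp, hq, hd1]
    have hc1 : ¬ ((-1 : Int) < 0 ∧ 1 + PySem.Chars.find (s.drop 1) ['{','%'] < 0) := by omega
    have hc1' : ¬ ((-1 : Int) < 0 ∧ PySem.Chars.find (s.drop 1) ['{','%'] < 0) := by omega
    have hc2 : ¬ (1 + PySem.Chars.find (s.drop 1) ['{','%'] < 0 ∨
        (0 ≤ (-1 : Int) ∧ (-1 : Int) < 1 + PySem.Chars.find (s.drop 1) ['{','%'])) := by omega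
    have hc2' : ¬ (PySem.Chars.find (s.drop 1) ['{','%'] < 0 ∨
        (0 ≤ (-1 : Int) ∧ (-1 : Int) < PySem.Chars.find (s.drop 1) ['{','%'])) := by omega
    rw [if_neg hc1, if_neg hc1', if_neg hc2, if_neg hc2']
    have ht : List.drop ((1 + PySem.Chars.find (List.drop 1 s) ['{','%']).toNat + 1) s
        = List.drop ((PySem.Chars.find (List.drop 1 s) ['{','%']).toNat + 1) (List.drop 1 s) := by
      rw [List.drop_drop]; congr 1; omega
    rw [ht]
    have ht2 : List.drop ((1 + PySem.Chars.find (List.drop 1 s) ['{','%']).toNat + 2) s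
        = List.drop ((PySem.Chars.find (List.drop 1 s) ['{','%']).toNat + 2) (List.drop 1 s) := by
      rw [List.drop_drop]; congr 1; omega
    rw [ht2]
  · -- p' ≥ 0, q' = -1 : both take the comment branch
    simp only [hd1, hd2, reduceIte] at hp hq
    rw [hp, hq, hd2]
    have hc1 : ¬ (1 + PySem.Chars.find (s.drop 1) ['{','#'] < 0 ∧ (-1 : Int) < 0) := by omega
    have hc1' : ¬ (PySem.Chars.find (s.drop 1) ['{','#'] < 0 ∧ (-1 : Int) < 0) := by omega
    have hc2 : ((-1 : Int) < 0 ∨ (0 ≤ 1 + PySem.Chars.find (s.drop 1) ['{','#'] ∧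
        1 + PySem.Chars.find (s.drop 1) ['{','#'] < -1)) := by omega
    have hc2' : ((-1 : Int) < 0 ∨ (0 ≤ PySem.Chars.find (s.drop 1) ['{','#'] ∧
        PySem.Chars.find (s.drop 1) ['{','#'] < -1)) := by omega
    rw [if_neg hc1, if_neg hc1', if_pos hc2, if_pos hc2']
    have ht : List.drop ((1 + PySem.Chars.find (List.drop 1 s) ['{','#']).toNat + 2) s
        = List.drop ((PySem.Chars.find (List.drop 1 s) ['{','#']).toNat + 2) (List.drop 1 s) := by
      rw [List.drop_drop]; congr 1; omega
    rw [ht]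
  · -- both ≥ 0
    simp only [hd1, hd2, reduceIte] at hp hq
    rw [hp, hq]
    have hc1 : ¬ (1 + PySem.Chars.find (s.drop 1) ['{','#'] < 0 ∧
        1 + PySem.Chars.find (s.drop 1) ['{','%'] < 0) := by omega
    have hc1' : ¬ (PySem.Chars.find (s.drop 1) ['{','#'] < 0 ∧
        PySem.Chars.find (s.drop 1) ['{','%'] < 0) := by omega
    rw [if_neg hc1, if_neg hc1']
    by_cases hlt : PySem.Chars.find (s.drop 1) ['{','#'] < PySem.Chars.find (s.drop 1) ['{','%']
    · have hc2 : (1 + PySem.Chars.find (s.drop 1) ['{','%'] < 0 ∨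
          (0 ≤ 1 + PySem.Chars.find (s.drop 1) ['{','#'] ∧
            1 + PySem.Chars.find (s.drop 1) ['{','#'] < 1 + PySem.Chars.find (s.drop 1) ['{','%'])) := by omega
      have hc2' : (PySem.Chars.find (s.drop 1) ['{','%'] < 0 ∨
          (0 ≤ PySem.Chars.find (s.drop 1) ['{','#'] ∧
            PySem.Chars.find (s.drop 1) ['{','#'] < PySem.Chars.find (s.drop 1) ['{','%'])) := by omega
      rw [if_pos hc2, if_pos hc2']
      have ht : List.drop ((1 + PySem.Chars.find (List.drop 1 s) ['{','#']).toNat + 2) s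
          = List.drop ((PySem.Chars.find (List.drop 1 s) ['{','#']).toNat + 2) (List.drop 1 s) := by
        rw [List.drop_drop]; congr 1; omega
      rw [ht]
    · have hc2 : ¬ (1 + PySem.Chars.find (s.drop 1) ['{','%'] < 0 ∨
          (0 ≤ 1 + PySem.Chars.find (s.drop 1) ['{','#'] ∧
            1 + PySem.Chars.find (s.drop 1) ['{','#'] < 1 + PySem.Chars.find (s.drop 1) ['{','%'])) := by omega
      have hc2' : ¬ (PySem.Chars.find (s.drop 1) ['{','%'] < 0 ∨
          (0 ≤ PySem.Chars.find (s.drop 1) ['{','#'] ∧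
            PySem.Chars.find (s.drop 1) ['{','#'] < PySem.Chars.find (s.drop 1) ['{','%'])) := by omega
      rw [if_neg hc2, if_neg hc2']
      have ht : List.drop ((1 + PySem.Chars.find (List.drop 1 s) ['{','%']).toNat + 1) s
          = List.drop ((PySem.Chars.find (List.drop 1 s) ['{','%']).toNat + 1) (List.drop 1 s) := by
        rw [List.drop_drop]; congr 1; omega
      rw [ht]
      have ht2b : List.drop ((1 + PySem.Chars.find (List.drop 1 s) ['{','%']).toNat + 2) s
            = List.drop ((PySem.Chars.find (List.drop 1 s) ['{','%']).toNat + 2) (List.drop 1 s) := by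
        rw [List.drop_drop]; congr 1; omega
      rw [ht2b]


lemma pvSliceTwo (cs : List Char) (i : Nat) :
    PySem.Chars.slice cs (some (i : Int)) (some ((i : Int) + 2)) = (cs.drop i).take 2 := by
  have h := PySem.List.slice_natCast_add (α := Char) cs i 2
  simp only [PySem.Chars.slice_eq_listSlice]
  have h2 : ((i : Int) + 2) = ((i : Int) + ((2 : Nat) : Int)) := by norm_cast
  rw [h2, h]

lemma pvLoop_eq (cs : List Char) :
    ∀ (k i : Nat) (block : Int) (comment : Bool), cs.length ≤ i + k →
      pvALoop cs i block comment = pvBLoop (cs.drop i) block comment := by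
  intro k
  induction k with
  | zero =>
    intro i block comment hk
    rw [pvALoop_ge cs i block comment (by omega)]
    rw [List.drop_eq_nil_of_le (by omega), pvBLoop_nil]
  | succ k ih =>
    intro i block comment hk
    by_cases hi : i < cs.length
    · rw [pvALoop]
      rw [dif_pos hi]
      cases comment with
      | true =>
        rw [PySem.Chars.findFrom_natCast cs ['#','}'] i (le_of_lt hi)]
        by_cases hf : PySem.Chars.find (cs.drop i) ['#','}'] = -1
        · rw [if_pos hf]
          rw [dif_neg (by norm_num)]
          conv_rhs => rw [pvBLoop]
          simp only [reduceIte]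
          rw [dif_neg (by rw [hf]; norm_num)]
        · have hf0 : 0 ≤ PySem.Chars.find (cs.drop i) ['#','}'] := by
            have := PySem.Chars.neg_one_le_find (cs.drop i) ['#','}']; omega
          rw [if_neg hf]
          rw [dif_pos (by omega)]
          have harg : ((i : Int) + PySem.Chars.find (cs.drop i) ['#','}']).toNat + 2
              = i + ((PySem.Chars.find (cs.drop i) ['#','}']).toNat + 2) := by omega
          rw [harg, ih _ block false (by omega)]
          conv_rhs => rw [pvBLoop]
          simp only [reduceIte]
          rw [dif_pos hf0, List.drop_drop]
      | false =>
        simp only [Bool.false_eq_true, if_false]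
        by_cases h1 : PySem.Chars.slice cs (some (i : Int)) (some ((i : Int) + 2)) = ['{', '#']
        · rw [if_pos h1]
          have hpre : (['{','#'] : List Char) <+: cs.drop i := by
            rw [List.prefix_iff_eq_take]
            rw [pvSliceTwo] at h1
            exact h1.symm
          rw [ih _ block true (by omega)]
          conv_rhs => rw [pvBLoop]
          simp only [Bool.false_eq_true, if_false]
          have hp0 : PySem.Chars.find (cs.drop i) ['{','#'] = 0 := pvFindOfPrefix _ _ hpre
          have hqne : PySem.Chars.find (cs.drop i) ['{','%'] ≠ 0 := by
            intro h
            have hq0 : 0 ≤ PySem.Chars.find (cs.drop i) ['{','%'] := by omega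
            have := (PySem.Chars.find_spec hq0).1
            rw [h] at this
            simp only [Int.toNat_zero, List.drop_zero] at this
            rw [List.prefix_iff_eq_take] at this hpre
            simp only [List.length_cons, List.length_nil] at this hpre
            rw [← hpre] at this
            simp at this
          have hqr := PySem.Chars.neg_one_le_find (cs.drop i) ['{','%']
          rw [if_neg (by rw [hp0]; omega)]
          rw [if_pos (by rw [hp0]; omega)]
          rw [hp0]
          norm_num [List.drop_drop]
        · by_cases h2 : PySem.Chars.slice cs (some (i : Int)) (some ((i : Int) + 2)) = ['{', '%']
          · rw [if_neg h1, if_pos h2]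
            have hpre : (['{','%'] : List Char) <+: cs.drop i := by
              rw [List.prefix_iff_eq_take]
              rw [pvSliceTwo] at h2
              exact h2.symm
            have hq0 : PySem.Chars.find (cs.drop i) ['{','%'] = 0 := pvFindOfPrefix _ _ hpre
            have hnpct : ¬ (['%','}'] : List Char) <+: cs.drop i := by
              intro h
              rw [List.prefix_iff_eq_take] at h hpre
              simp only [List.length_cons, List.length_nil] at h hpre
              rw [← hpre] at h
              simp at h
            have hstep := pvFindDropOne (cs.drop i) ['%','}'] hnpct
            rw [List.drop_drop] at hstep
            rw [PySem.Chars.findFrom_natCast cs ['%','}'] i (le_of_lt hi)]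
            conv_rhs => rw [pvBLoop]
            simp only [Bool.false_eq_true, if_false]
            have hb1 : ¬ (PySem.Chars.find (cs.drop i) ['{','#'] < 0 ∧
                PySem.Chars.find (cs.drop i) ['{','%'] < 0) := by rw [hq0]; omega
            have hb2 : ¬ (PySem.Chars.find (cs.drop i) ['{','%'] < 0 ∨
                (0 ≤ PySem.Chars.find (cs.drop i) ['{','#'] ∧
                  PySem.Chars.find (cs.drop i) ['{','#'] < PySem.Chars.find (cs.drop i) ['{','%'])) := by
              rw [hq0]; omega
            conv_rhs => rw [if_neg hb1, if_neg hb2]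
            by_cases hf : PySem.Chars.find (cs.drop (i + 1)) ['%','}'] = -1
            · have hA : PySem.Chars.find (cs.drop i) ['%','}'] = -1 := by
                rw [hstep, if_pos hf]
              rw [hA]
              norm_num
              rw [ih (i + 2) block false (by omega)]
              rw [hq0]
              norm_num
              simp [hf]
            · have hf0 : 0 ≤ PySem.Chars.find (cs.drop (i + 1)) ['%','}'] := by
                have := PySem.Chars.neg_one_le_find (cs.drop (i + 1)) ['%','}']; omega
              have hA : PySem.Chars.find (cs.drop i) ['%','}']
                  = 1 + PySem.Chars.find (cs.drop (i + 1)) ['%','}'] := by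
                rw [hstep, if_neg hf]
              rw [hA]
              rw [if_neg (by omega)]
              rw [dif_pos (by omega)]
              set f := PySem.Chars.find (cs.drop (i + 1)) ['%','}'] with hfv
              have htag : PySem.Chars.slice cs (some ((i : Int) + 2)) (some ((i : Int) + (1 + f)))
                  = PySem.List.slice (List.drop (i + 1) cs) (some 1) (some f) := by
                simp only [PySem.Chars.slice_eq_listSlice]
                rw [PySem.List.slice_toNat cs (by omega) (by omega)]
                rw [PySem.List.slice_toNat _ (by omega) (by omega)]
                rw [List.drop_drop]
                have e1 : ((i : Int) + 2).toNat = i + 2 := by omega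
                have e2 : ((i : Int) + (1 + f)).toNat = i + 1 + f.toNat := by omega
                have e3 : ((1 : Int)).toNat = 1 := by omega
                rw [e1, e2, e3]
                have e4 : i + 1 + f.toNat - (i + 2) = f.toNat - 1 := by omega
                have e5 : i + 1 + 1 = i + 2 := by omega
                rw [e4, e5]
              rw [htag, pvTagUpdate_eq]
              have harg : ((i : Int) + (1 + f)).toNat + 2 = (i + 1) + (f.toNat + 2) := by omega
              rw [harg, ih _ _ false (by omega)]
              rw [hq0]
              norm_num [List.drop_drop]
              rw [← hfv, if_pos hf0]
          · rw [if_neg h1, if_neg h2]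
            rw [ih _ block false (by omega)]
            have hnp : ¬ (['{','#'] : List Char) <+: cs.drop i := by
              intro h; apply h1; rw [pvSliceTwo]
              rw [List.prefix_iff_eq_take] at h
              exact h.symm
            have hnq : ¬ (['{','%'] : List Char) <+: cs.drop i := by
              intro h; apply h2; rw [pvSliceTwo]
              rw [List.prefix_iff_eq_take] at h
              exact h.symm
            rw [pvBLoop_shift (cs.drop i) block hnp hnq, List.drop_drop]
    · rw [pvALoop_ge cs i block comment hi]
      rw [List.drop_eq_nil_of_le (by omega), pvBLoop_nil]

-- ===== VERDICT (by name: the statement is the Claim_ definition above) =====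
theorem update_jinja_state_py_spec : Claim_equal_update_jinja_state_py := by
  intro line block comment _
  unfold Spec_update_jinja_state_py update_jinja_state_py update_jinja_state_py_alt
  simpa using pvLoop_eq line.toList line.toList.length 0 block comment (by omega)
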